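-- pv_equiv track=rewrite | github.com/abunuwas/fencer | fencer/BOLA.py | parameter_location_num
-- ===== SOURCE A (Python) =====
-- def parameter_location_num(operation_dict):# If parameter have same name and location type is difference,then that location_num is multiple.
--     seen_parameters = {}
--     location_num = 0
--     for parameter in operation_dict.get('parameters',[]):
--         parameter_name = parameter['name']
--         parameter_location = parameter['in']
--         if parameter_name in seen_parameters:
--             if seen_parameters[parameter_name] != parameter_location:
--                 location_num += 1
--         else:
--             seen_parameters[parameter_name] = parameter_location
--     return location_num
-- ===== SOURCE B (Python) =====
-- def parameter_location_num(operation_dict):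
--     # Build name -> list of locations in encounter order, then count, per name,
--     # the later occurrences whose location differs from the first one.
--     groups = {}
--     for parameter in operation_dict.get('parameters', []):
--         name = parameter['name']
--         loc = parameter['in']
--         groups[name] = groups.get(name, []) + [loc]
--     total = 0
--     for locs in groups.values():
--         first = locs[0]
--         total += sum(1 for l in locs[1:] if l != first)
--     return total
-- ===== Notes on version B (the rewrite author's own statement) =====
-- stated objective: alternative
-- what changed: A's single interleaved pass that maintains a first-seen-location dict and a running counter is replaced by a grouping pass building name -> list of locations followed by a separate counting pass over the groups (later occurrences differing from each group's first location).
import Mathlib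
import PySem

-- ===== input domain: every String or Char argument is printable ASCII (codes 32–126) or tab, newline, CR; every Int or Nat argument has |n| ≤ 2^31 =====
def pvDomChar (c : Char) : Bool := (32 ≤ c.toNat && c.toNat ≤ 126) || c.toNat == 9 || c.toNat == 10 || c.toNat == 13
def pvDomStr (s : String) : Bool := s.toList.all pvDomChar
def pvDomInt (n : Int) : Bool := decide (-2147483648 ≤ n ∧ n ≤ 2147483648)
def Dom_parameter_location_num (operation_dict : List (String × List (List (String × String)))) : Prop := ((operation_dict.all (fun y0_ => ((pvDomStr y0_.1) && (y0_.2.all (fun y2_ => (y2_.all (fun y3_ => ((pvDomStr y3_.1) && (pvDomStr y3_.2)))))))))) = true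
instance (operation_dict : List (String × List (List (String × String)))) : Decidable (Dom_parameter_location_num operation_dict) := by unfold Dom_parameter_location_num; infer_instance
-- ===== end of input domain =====

set_option maxRecDepth 4096


-- B replaces A's single interleaved seen-dict pass by a grouping pass (name -> locations) followed by
-- a separate counting pass over the groups; objective: alternative decomposition, same return value.

-- ===== PORT A =====
-- parameter['name'] / parameter['in'] (KeyError when absent → excluded by Pre_; on Pre_ the default is never used)
def pvName (p : List (String × String)) : String := (PySem.Dict.mk p).getD "name" ""
def pvLoc (p : List (String × String)) : String := (PySem.Dict.mk p).getD "in" ""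

def parameter_location_num (operation_dict : List (String × List (List (String × String)))) : Int :=
  let params := (PySem.Dict.mk operation_dict).getD "parameters" []
  (params.foldl
    (fun (st : PySem.Dict String String × Int) p =>
      let parameter_name := pvName p
      let parameter_location := pvLoc p
      if st.1.contains parameter_name then
        if st.1.getD parameter_name "" ≠ parameter_location then (st.1, st.2 + 1) else st
      else (st.1.insert parameter_name parameter_location, st.2))
    (PySem.Dict.empty, 0)).2

-- ===== PORT B =====
def parameter_location_num_alt (operation_dict : List (String × List (List (String × String)))) : Int :=
  let params := (PySem.Dict.mk operation_dict).getD "parameters" []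
  let groups : PySem.Dict String (List String) :=
    params.foldl (fun g p => g.modify (pvName p) [] (· ++ [pvLoc p])) PySem.Dict.empty
  groups.values.foldl
    (fun t locs =>
      match locs with
      | [] => t                                 -- unreachable: every group is nonempty
      | first :: rest => t + ((rest.filter (fun l => l ≠ first)).length : Int)) 0

-- ===== PRECONDITION & SPEC =====
-- Pre_ excludes exactly the inputs where A raises KeyError: a parameter dict missing 'name' or 'in'.
def Pre_parameter_location_num (operation_dict : List (String × List (List (String × String)))) : Prop :=
  ∀ p ∈ (PySem.Dict.mk operation_dict).getD "parameters" [],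
    ((PySem.Dict.mk p).get? "name").isSome = true ∧ ((PySem.Dict.mk p).get? "in").isSome = true
instance (operation_dict : List (String × List (List (String × String)))) : Decidable (Pre_parameter_location_num operation_dict) := by unfold Pre_parameter_location_num; infer_instance

def pvWitness_parameter_location_num : (List (String × List (List (String × String)))) :=
  [("parameters", [[("name", "id"), ("in", "query")], [("name", "id"), ("in", "path")]])]

def Spec_parameter_location_num (operation_dict : List (String × List (List (String × String)))) (out : Int) : Prop := out = parameter_location_num_alt operation_dict
instance (operation_dict : List (String × List (List (String × String)))) (out : Int) : Decidable (Spec_parameter_location_num operation_dict out) := by unfold Spec_parameter_location_num; infer_instance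

-- ===== CLAIM (what is proved, stated in full; the proofs are below) =====
def Claim_equal_parameter_location_num : Prop := ∀ (operation_dict : List (String × List (List (String × String)))), Dom_parameter_location_num operation_dict → Pre_parameter_location_num operation_dict → Spec_parameter_location_num operation_dict (parameter_location_num operation_dict)

-- ===== LEMMAS AND PROOFS =====

-- locations of name n among the (name, loc) pairs ps, in order
def pvLocs (n : String) (ps : List (String × String)) : List String :=
  (ps.filter (fun q => q.1 == n)).map (·.2)

-- weight of one group: later occurrences differing from the first
def pvW : List String → Int
  | [] => 0
  | first :: rest => ((rest.filter (fun l => l ≠ first)).length : Int)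

def pvStepA (st : PySem.Dict String String × Int) (q : String × String) :
    PySem.Dict String String × Int :=
  if st.1.contains q.1 then
    if st.1.getD q.1 "" ≠ q.2 then (st.1, st.2 + 1) else st
  else (st.1.insert q.1 q.2, st.2)

def pvGroups (ps : List (String × String)) : PySem.Dict String (List String) :=
  ps.foldl (fun g q => g.modify q.1 [] (· ++ [q.2])) PySem.Dict.empty

lemma pvLocs_append (n : String) (ps : List (String × String)) (q : String × String) :
    pvLocs n (ps ++ [q]) = pvLocs n ps ++ (if q.1 == n then [q.2] else []) := by
  simp only [pvLocs, List.filter_append, List.map_append]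
  cases h : q.1 == n <;> simp [List.filter, h]

lemma pvGroups_append (ps : List (String × String)) (q : String × String) :
    pvGroups (ps ++ [q]) = (pvGroups ps).modify q.1 [] (· ++ [q.2]) := by
  simp [pvGroups]

lemma pvGroups_getD (ps : List (String × String)) (n : String) :
    (pvGroups ps).getD n [] = pvLocs n ps := by
  simp [pvGroups, pvLocs, PySem.Dict.getD_foldl_modify_append]

lemma pvGroups_nodup (ps : List (String × String)) : (pvGroups ps).keys.Nodup :=
  PySem.Dict.nodup_keys_foldl_modify_key ps Prod.fst [] (fun _ q => (· ++ [q.2])) PySem.Dict.empty (by simp)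

lemma pvGroups_mem_keys (ps : List (String × String)) (n : String) :
    n ∈ (pvGroups ps).keys ↔ pvLocs n ps ≠ [] := by
  rw [pvGroups, PySem.Dict.keys_foldl_modify_key ps Prod.fst [] (fun _ q => (· ++ [q.2])) PySem.Dict.empty]
  simp only [PySem.Set.mem_update, PySem.Dict.keys_empty, List.not_mem_nil, false_or]
  constructor
  · intro h
    rcases List.mem_map.mp h with ⟨q, hq, rfl⟩
    have hmem : q ∈ ps.filter (fun r => r.1 == q.1) := List.mem_filter.mpr ⟨hq, by simp⟩
    simp only [pvLocs, ne_eq, List.map_eq_nil_iff]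
    intro hnil
    rw [hnil] at hmem
    cases hmem
  · intro h
    have hf : ps.filter (fun r => r.1 == n) ≠ [] := by
      simpa [pvLocs, List.map_eq_nil_iff] using h
    obtain ⟨q, hq⟩ := List.exists_mem_of_ne_nil _ hf
    rcases List.mem_filter.mp hq with ⟨hqm, hqn⟩
    exact List.mem_map.mpr ⟨q, hqm, by simpa using hqn⟩

lemma pvGroups_contains (ps : List (String × String)) (n : String) :
    (pvGroups ps).contains n = true ↔ pvLocs n ps ≠ [] := by
  rw [PySem.Dict.contains_iff_mem_keys]
  exact pvGroups_mem_keys ps n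

lemma pvW_snoc (f : String) (r : List String) (l : String) :
    pvW ((f :: r) ++ [l]) = pvW (f :: r) + (if l ≠ f then 1 else 0) := by
  by_cases h : l = f <;>
    simp [pvW, List.filter_append, List.filter, h]

lemma pvSum_update (ks : List String) (w1 w2 : String → Int) (m : String)
    (hnd : ks.Nodup) (hm : m ∈ ks) (hw : ∀ k ∈ ks, k ≠ m → w2 k = w1 k) :
    (ks.map w2).sum = (ks.map w1).sum + (w2 m - w1 m) := by
  induction ks with
  | nil => cases hm
  | cons k ks ih =>
    rcases List.nodup_cons.mp hnd with ⟨hk, hnd'⟩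
    rcases List.mem_cons.mp hm with rfl | hm'
    · have hall : ∀ x ∈ ks, w2 x = w1 x := fun x hx => hw x (List.mem_cons_of_mem _ hx) (fun h => hk (h ▸ hx))
      simp only [List.map_cons, List.sum_cons, List.map_congr_left hall]
      ring
    · have hkm : k ≠ m := fun h => hk (h ▸ hm')
      rw [List.map_cons, List.sum_cons, List.map_cons, List.sum_cons,
        hw k (List.mem_cons_self) hkm,
        ih hnd' hm' (fun x hx => hw x (List.mem_cons_of_mem _ hx))]
      ring

lemma pvSeen_char (ps : List (String × String)) (n : String) :
    (ps.foldl pvStepA (PySem.Dict.empty, 0)).1.get? n = (pvLocs n ps).head? := by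
  induction ps using List.reverseRecOn generalizing n with
  | nil => simp [pvLocs, PySem.Dict.get?_empty]
  | append_singleton ps q ih =>
    rw [List.foldl_append, List.foldl_cons, List.foldl_nil, pvLocs_append]
    rcases hst : ps.foldl pvStepA (PySem.Dict.empty, 0) with ⟨seen, cnt⟩
    have hseen : ∀ m, seen.get? m = (pvLocs m ps).head? := by
      intro m; rw [← ih m, hst]
    unfold pvStepA
    by_cases hc : seen.contains q.1 = true
    · have hne : pvLocs q.1 ps ≠ [] := by
        intro h
        rw [PySem.Dict.contains_eq_isSome_get?, hseen q.1, h] at hc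
        simp at hc
      have hfst : (if seen.getD q.1 "" ≠ q.2 then (seen, cnt + 1) else (seen, cnt)).1 = seen := by
        split <;> rfl
      rw [if_pos hc, hfst, hseen n]
      cases h : (q.1 == n)
      · simp
      · have hqn : q.1 = n := by simpa using h
        subst hqn
        rcases List.exists_cons_of_ne_nil hne with ⟨f, r, hfr⟩
        rw [hfr]
        simp
    · rw [if_neg hc]
      have hnil : pvLocs q.1 ps = [] := by
        rw [PySem.Dict.contains_eq_isSome_get?, hseen q.1] at hc
        cases h : pvLocs q.1 ps <;> simp [h] at hc ⊢
      cases h : (q.1 == n)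
      · have hne : n ≠ q.1 := (ne_of_beq_false h).symm
        rw [PySem.Dict.get?_insert_of_ne seen q.2 hne, hseen n]
        simp
      · have hqn : q.1 = n := by simpa using h
        subst hqn
        rw [PySem.Dict.get?_insert_self, hnil]
        simp

lemma pvCnt_char (ps : List (String × String)) :
    (ps.foldl pvStepA (PySem.Dict.empty, 0)).2 =
      ((pvGroups ps).keys.map (fun n => pvW (pvLocs n ps))).sum := by
  induction ps using List.reverseRecOn with
  | nil => simp [pvGroups, PySem.Dict.keys_empty]
  | append_singleton ps q ih =>
    rw [List.foldl_append, List.foldl_cons, List.foldl_nil]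
    have hseen := pvSeen_char ps
    rcases hst : ps.foldl pvStepA (PySem.Dict.empty, 0) with ⟨seen, cnt⟩
    rw [hst] at ih hseen
    simp only at ih hseen
    unfold pvStepA
    by_cases hc : seen.contains q.1 = true
    · -- q.1 already seen: pvLocs q.1 ps = f :: r
      have hne : pvLocs q.1 ps ≠ [] := by
        intro h
        rw [PySem.Dict.contains_eq_isSome_get?, hseen q.1, h] at hc
        simp at hc
      rcases List.exists_cons_of_ne_nil hne with ⟨f, r, hfr⟩
      have hgd : seen.getD q.1 "" = f := by
        rw [PySem.Dict.getD_eq_get?_getD, hseen q.1, hfr]; rfl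
      have hgc : (pvGroups ps).contains q.1 = true := (pvGroups_contains ps q.1).mpr hne
      have hkeys : (pvGroups (ps ++ [q])).keys = (pvGroups ps).keys := by
        rw [pvGroups_append, PySem.Dict.keys_modify]
        exact PySem.Dict.keys_insert_of_contains _ _ hgc
      rw [if_pos hc, hkeys,
        pvSum_update ((pvGroups ps).keys) (fun n => pvW (pvLocs n ps))
          (fun n => pvW (pvLocs n (ps ++ [q]))) q.1 (pvGroups_nodup ps)
          ((pvGroups_mem_keys ps q.1).mpr hne)
          (fun k _ hkq => by
            show pvW (pvLocs k (ps ++ [q])) = pvW (pvLocs k ps)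
            rw [pvLocs_append, if_neg (by simp only [beq_iff_eq]; exact Ne.symm hkq), List.append_nil])]
      show (if seen.getD q.1 "" ≠ q.2 then (seen, cnt + 1) else (seen, cnt)).2 = _
      rw [hgd]
      have hlq : pvLocs q.1 (ps ++ [q]) = (f :: r) ++ [q.2] := by
        rw [pvLocs_append, hfr, if_pos (by simp)]
      simp only [hlq, hfr, pvW_snoc]
      by_cases hq : q.2 = f
      · rw [if_neg (by simp [hq]), if_neg (by simp [hq])]
        show cnt = _
        rw [ih]; ring
      · rw [if_pos (Ne.symm hq), if_pos hq]
        show cnt + 1 = _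
        rw [ih]; ring
    · -- q.1 fresh
      have hnil : pvLocs q.1 ps = [] := by
        by_contra h
        rcases List.exists_cons_of_ne_nil h with ⟨f, r, hfr⟩
        apply hc
        rw [PySem.Dict.contains_eq_isSome_get?, hseen q.1, hfr]
        rfl
      have hgc : (pvGroups ps).contains q.1 = false := by
        rw [← Bool.not_eq_true, pvGroups_contains]
        simp [hnil]
      have hkeys : (pvGroups (ps ++ [q])).keys = (pvGroups ps).keys ++ [q.1] := by
        rw [pvGroups_append, PySem.Dict.keys_modify]
        exact PySem.Dict.keys_insert_of_not_contains _ _ hgc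
      rw [if_neg hc, hkeys, List.map_append, List.sum_append]
      have hmap : ((pvGroups ps).keys.map (fun n => pvW (pvLocs n (ps ++ [q])))) =
          ((pvGroups ps).keys.map (fun n => pvW (pvLocs n ps))) := by
        apply List.map_congr_left
        intro k hk
        have hkq : k ≠ q.1 := fun h => ((pvGroups_mem_keys ps k).mp hk) (h ▸ hnil)
        rw [pvLocs_append, if_neg (by simp only [beq_iff_eq]; exact Ne.symm hkq), List.append_nil]
      have hlq : pvLocs q.1 (ps ++ [q]) = [q.2] := by
        rw [pvLocs_append, hnil, if_pos (by simp)]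
        simp
      rw [hmap]
      show cnt = _
      rw [ih]
      simp [hlq, pvW]

lemma pvFold_match (L : List (List String)) (t : Int) :
    L.foldl
      (fun t locs =>
        match locs with
        | [] => t
        | first :: rest => t + ((rest.filter (fun l => l ≠ first)).length : Int)) t =
      t + (L.map pvW).sum := by
  induction L generalizing t with
  | nil => simp
  | cons locs L ih =>
    rw [List.foldl_cons]
    cases locs with
    | nil => rw [ih]; simp [pvW]
    | cons f r =>
      rw [ih]
      simp only [List.map_cons, List.sum_cons, pvW]
      ring

lemma pvB_sum (ps : List (String × String)) :
    (pvGroups ps).values.foldl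
      (fun t locs =>
        match locs with
        | [] => t
        | first :: rest => t + ((rest.filter (fun l => l ≠ first)).length : Int)) 0 =
      ((pvGroups ps).keys.map (fun n => pvW (pvLocs n ps))).sum := by
  rw [PySem.Dict.values_eq_map_keys (pvGroups ps) (pvGroups_nodup ps) [], pvFold_match]
  simp only [List.map_map, zero_add]
  congr 1
  apply List.map_congr_left
  intro k _
  simp [Function.comp, pvGroups_getD]

-- ===== VERDICT (by name: the statement is the Claim_ definition above) =====
theorem parameter_location_num_spec : Claim_equal_parameter_location_num := by
  intro od _ _
  show parameter_location_num od = parameter_location_num_alt od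
  unfold parameter_location_num parameter_location_num_alt
  set params := (PySem.Dict.mk od).getD "parameters" [] with hp
  have hA : params.foldl
      (fun (st : PySem.Dict String String × Int) p =>
        if st.1.contains (pvName p) then
          if st.1.getD (pvName p) "" ≠ (pvLoc p) then (st.1, st.2 + 1) else st
        else (st.1.insert (pvName p) (pvLoc p), st.2))
      (PySem.Dict.empty, 0) =
      (params.map (fun p => (pvName p, pvLoc p))).foldl pvStepA (PySem.Dict.empty, 0) := by
    rw [List.foldl_map]
    rfl
  have hB : params.foldl (fun (g : PySem.Dict String (List String)) p =>
      g.modify (pvName p) [] (· ++ [pvLoc p])) PySem.Dict.empty =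
      pvGroups (params.map (fun p => (pvName p, pvLoc p))) := by
    rw [pvGroups, List.foldl_map]
  simp only [hA, hB, pvCnt_char, pvB_sum]
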